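-- pv_equiv track=rewrite | github.com/sacha-renault/py-nn | src/pynn/utils/broadcast.py | _find_broadcast_axes
-- ===== SOURCE A (Python) =====
-- def _find_broadcast_axes(shape_a, shape_b):
--     if isinstance(shape_a, int):
--         return list(range(len(shape_b)))
--
--     if isinstance(shape_b, int):
--         return list(range(len(shape_a)))
--
--     l = len(shape_a) - 1
--     r = len(shape_b) - 1
--     axes = []
--
--     while l >= 0 or r >= 0:
--         dim_a = shape_a[l] if l >= 0 else 1
--         dim_b = shape_b[r] if r >= 0 else 1
--
--         if dim_a == dim_b:
--             pass  # No broadcasting needed on this axis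
--         elif dim_a == 1 or dim_b == 1:
--             # Broadcasting occurs on this axis
--             axes.append(max(l, r))
--         else:
--             # Dimensions are incompatible
--             raise ValueError(f"Incompatible dimensions at positions {l} and {r}: {dim_a} vs {dim_b}")
--
--         l -= 1
--         r -= 1
--
--     return axes[::-1]  # Return axes in increasing order
-- ===== SOURCE B (Python) =====
-- def _find_broadcast_axes(shape_a, shape_b):
--     if isinstance(shape_a, int):
--         return list(range(len(shape_b)))
--
--     if isinstance(shape_b, int):
--         return list(range(len(shape_a)))
--
--     n = max(len(shape_a), len(shape_b))
--     padded_a = [1] * (n - len(shape_a)) + list(shape_a)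
--     padded_b = [1] * (n - len(shape_b)) + list(shape_b)
--
--     axes = []
--     for i, (dim_a, dim_b) in enumerate(zip(padded_a, padded_b)):
--         if dim_a == dim_b:
--             pass  # No broadcasting needed on this axis
--         elif dim_a == 1 or dim_b == 1:
--             axes.append(i)
--         else:
--             raise ValueError(
--                 f"Incompatible dimensions at axis {i}: {dim_a} vs {dim_b}")
--     return axes
-- ===== Notes on version B (the rewrite author's own statement) =====
-- stated objective: alternative
-- what changed: Replaces A's backward two-pointer walk (dangling-index guards, append then final [::-1] reversal) by left-padding both shapes with 1s to a common length and a single forward enumerate pass over the aligned pairs, emitting axes already in increasing order.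
import Mathlib
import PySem

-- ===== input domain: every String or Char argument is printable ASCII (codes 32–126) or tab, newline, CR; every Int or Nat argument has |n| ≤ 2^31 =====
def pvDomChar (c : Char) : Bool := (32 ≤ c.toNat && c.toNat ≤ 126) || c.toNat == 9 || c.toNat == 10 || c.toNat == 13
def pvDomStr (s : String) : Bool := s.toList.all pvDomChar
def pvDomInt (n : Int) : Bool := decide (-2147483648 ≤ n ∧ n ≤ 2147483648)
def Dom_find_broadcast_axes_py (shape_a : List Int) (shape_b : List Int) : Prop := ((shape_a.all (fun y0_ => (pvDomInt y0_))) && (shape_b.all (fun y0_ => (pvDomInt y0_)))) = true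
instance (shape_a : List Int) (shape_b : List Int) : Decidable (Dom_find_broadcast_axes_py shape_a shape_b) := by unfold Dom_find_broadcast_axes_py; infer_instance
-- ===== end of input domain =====

-- B replaces A's backward two-pointer walk + final reversal by left-padding both
-- shapes to a common length and one forward enumerate pass (alternative decomposition,
-- same O(n) cost). Equivalence of the RETURN value is proved on Pre_ (where A returns).

-- ===== PORT A =====
-- while loop of A: fuel = max(len a, len b) is exactly the number of iterations of
-- 'while l >= 0 or r >= 0' since both counters drop by 1 each round.
def pvALoop (a b : List Int) : Nat → Int → Int → List Int → List Int
  | 0, _l, _r, axes => axes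
  | fuel+1, l, r, axes =>
    let dim_a := if l ≥ 0 then (PySem.List.pyGet? a l).getD 1 else 1
    let dim_b := if r ≥ 0 then (PySem.List.pyGet? b r).getD 1 else 1
    let axes' :=
      if dim_a = dim_b then axes
      else if dim_a = 1 ∨ dim_b = 1 then axes ++ [max l r]
      else axes  -- Python raises ValueError here; such inputs are excluded by Pre_
    pvALoop a b fuel (l-1) (r-1) axes'

-- the int-guard branches of the Python cannot fire (both arguments are lists here)
def find_broadcast_axes_py (shape_a : List Int) (shape_b : List Int) : List Int :=
  -- axes[::-1] is List.reverse (exact)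
  (pvALoop shape_a shape_b (max shape_a.length shape_b.length)
      ((shape_a.length : Int) - 1) ((shape_b.length : Int) - 1) []).reverse

-- ===== PORT B =====
def find_broadcast_axes_py_alt (shape_a : List Int) (shape_b : List Int) : List Int :=
  let n := max shape_a.length shape_b.length
  let padded_a := List.replicate (n - shape_a.length) 1 ++ shape_a
  let padded_b := List.replicate (n - shape_b.length) 1 ++ shape_b
  (PySem.List.enumerate (padded_a.zip padded_b) 0).foldl
    (fun axes x =>
      if x.2.1 = x.2.2 then axes
      else if x.2.1 = 1 ∨ x.2.2 = 1 then axes ++ [x.1]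
      else axes)  -- Python raises ValueError here; excluded by Pre_
    []

-- ===== PRECONDITION & SPEC =====
-- value of the left-1-padded shape (to length n) at aligned axis i
def pvPadGet (n : Nat) (s : List Int) (i : Nat) : Int :=
  if i < n - s.length then 1 else s.getD (i - (n - s.length)) 1

-- Pre_ excludes exactly the inputs on which the Python raises ValueError
-- (some aligned axis has unequal dims, neither equal to 1).
def Pre_find_broadcast_axes_py (shape_a : List Int) (shape_b : List Int) : Prop :=
  ∀ i : Nat, i < max shape_a.length shape_b.length →
    pvPadGet (max shape_a.length shape_b.length) shape_a i
      = pvPadGet (max shape_a.length shape_b.length) shape_b i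
    ∨ pvPadGet (max shape_a.length shape_b.length) shape_a i = 1
    ∨ pvPadGet (max shape_a.length shape_b.length) shape_b i = 1
instance (shape_a : List Int) (shape_b : List Int) : Decidable (Pre_find_broadcast_axes_py shape_a shape_b) := by
  unfold Pre_find_broadcast_axes_py; infer_instance

def pvWitness_find_broadcast_axes_py : List Int × List Int := ([2, 1, 3], [1, 4, 3])

def Spec_find_broadcast_axes_py (shape_a : List Int) (shape_b : List Int) (out : List Int) : Prop := out = find_broadcast_axes_py_alt shape_a shape_b
instance (shape_a : List Int) (shape_b : List Int) (out : List Int) : Decidable (Spec_find_broadcast_axes_py shape_a shape_b out) := by unfold Spec_find_broadcast_axes_py; infer_instance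

-- ===== CLAIM (what is proved, stated in full; the proofs are below) =====
def Claim_equal_find_broadcast_axes_py : Prop := ∀ (shape_a : List Int) (shape_b : List Int), Dom_find_broadcast_axes_py shape_a shape_b → Pre_find_broadcast_axes_py shape_a shape_b → Spec_find_broadcast_axes_py shape_a shape_b (find_broadcast_axes_py shape_a shape_b)

-- ===== LEMMAS AND PROOFS =====

-- the broadcast decision at aligned axis i, as an optional emitted axis
def pvG (a b : List Int) (n : Nat) (i : Nat) : Option Int :=
  if pvPadGet n a i = pvPadGet n b i then none
  else if pvPadGet n a i = 1 ∨ pvPadGet n b i = 1 then some (i : Int)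
  else none

theorem pvDim_eq (s : List Int) (n m : Nat) (hs : s.length ≤ n) (hm : m < n) :
    (if ((s.length : Int) - n + m ≥ 0) then (PySem.List.pyGet? s ((s.length : Int) - n + m)).getD 1 else 1)
      = pvPadGet n s m := by
  unfold pvPadGet
  by_cases h : m < n - s.length
  · rw [if_neg (by omega), if_pos h]
  · have hge : ((s.length : Int) - n + m ≥ 0) := by omega
    rw [if_pos hge, if_neg h]
    have hk : ((s.length : Int) - n + m) = ((m - (n - s.length) : Nat) : Int) := by omega
    rw [hk, PySem.List.pyGet?_natCast]
    have hlt : m - (n - s.length) < s.length := by omega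
    rw [List.getElem?_eq_getElem hlt, List.getD_eq_getElem?_getD, List.getElem?_eq_getElem hlt]

theorem pvALoop_eq (a b : List Int) (n : Nat) (hN : n = max a.length b.length) :
    ∀ (m : Nat), m ≤ n → ∀ (axes : List Int),
      pvALoop a b m ((a.length : Int) - n + m - 1) ((b.length : Int) - n + m - 1) axes
        = axes ++ ((List.range m).filterMap (pvG a b n)).reverse := by
  intro m
  induction m with
  | zero => intro _ axes; simp [pvALoop]
  | succ m ih =>
    intro hmn axes
    have hm : m < n := by omega
    show pvALoop a b (m+1) _ _ axes = _
    rw [pvALoop]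
    simp only [Nat.cast_add, Nat.cast_one]
    have hma : ((a.length : Int) - n + (m+1) - 1) = ((a.length : Int) - n + m) := by ring
    have hmb : ((b.length : Int) - n + (m+1) - 1) = ((b.length : Int) - n + m) := by ring
    rw [hma, hmb]
    have hda := pvDim_eq a n m (by omega) hm
    have hdb := pvDim_eq b n m (by omega) hm
    have hmax : max ((a.length : Int) - n + m) ((b.length : Int) - n + m) = (m : Int) := by
      omega
    rw [hda, hdb, hmax]
    rw [ih (by omega)]
    rw [List.range_succ, List.filterMap_append, List.reverse_append]
    have hsingle :
        (if pvPadGet n a m = pvPadGet n b m then axes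
         else if pvPadGet n a m = 1 ∨ pvPadGet n b m = 1 then axes ++ [(m : Int)]
         else axes)
        = axes ++ (([m].filterMap (pvG a b n)).reverse) := by
      unfold pvG; split_ifs <;> simp_all
    rw [hsingle, List.append_assoc]

theorem pvPad_eq_map_range (s : List Int) (n : Nat) (hs : s.length ≤ n) :
    List.replicate (n - s.length) 1 ++ s = (List.range n).map (pvPadGet n s) := by
  apply List.ext_getElem
  · simp; omega
  · intro i h1 h2
    simp only [List.getElem_map, List.getElem_range]
    unfold pvPadGet
    rcases Nat.lt_or_ge i (n - s.length) with h | h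
    · rw [List.getElem_append_left (by simpa using h), if_pos h, List.getElem_replicate]
    · have hlen : (List.replicate (n - s.length) (1:Int)).length = n - s.length := by simp
      rw [List.getElem_append_right (by omega), if_neg (by omega)]
      have hlt : i - (n - s.length) < s.length := by
        simp at h1; omega
      rw [List.getD_eq_getElem?_getD, List.getElem?_eq_getElem hlt]
      simp [hlen]

theorem pvEnumerate_map_range {α : Type} (f : Nat → α) (n : Nat) :
    PySem.List.enumerate ((List.range n).map f) 0
      = (List.range n).map (fun k : Nat => ((k : Int), f k)) := by
  apply List.ext_getElem
  · simp [PySem.List.length_enumerate]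
  · intro i h1 h2
    rw [PySem.List.getElem_enumerate]
    simp

theorem pvFoldl_opt {α β : Type} (f : α → Option β) :
    ∀ (l : List α) (acc : List β),
      l.foldl (fun axes x => axes ++ (f x).toList) acc = acc ++ l.filterMap f := by
  intro l
  induction l with
  | nil => simp
  | cons x xs ih =>
    intro acc
    simp only [List.foldl_cons, ih, List.filterMap_cons]
    cases f x <;> simp

theorem pvAlt_eq (a b : List Int) :
    find_broadcast_axes_py_alt a b
      = (List.range (max a.length b.length)).filterMap (pvG a b (max a.length b.length)) := by
  unfold find_broadcast_axes_py_alt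
  dsimp only
  set n := max a.length b.length with hn
  rw [pvPad_eq_map_range a n (by omega), pvPad_eq_map_range b n (by omega)]
  rw [List.zip_map']
  rw [pvEnumerate_map_range (fun i => (pvPadGet n a i, pvPadGet n b i)) n]
  have hstep :
      (fun (axes : List Int) (x : Int × Int × Int) =>
        if x.2.1 = x.2.2 then axes
        else if x.2.1 = 1 ∨ x.2.2 = 1 then axes ++ [x.1]
        else axes)
      = (fun axes x => axes ++ ((fun (x : Int × Int × Int) =>
          if x.2.1 = x.2.2 then none
          else if x.2.1 = 1 ∨ x.2.2 = 1 then some x.1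
          else none) x).toList) := by
    funext axes x; split_ifs <;> simp_all
  rw [hstep, pvFoldl_opt, List.filterMap_map]
  simp only [List.nil_append]
  apply List.filterMap_congr
  intro k _
  unfold pvG
  rfl

theorem pvA_eq (a b : List Int) :
    find_broadcast_axes_py a b
      = (List.range (max a.length b.length)).filterMap (pvG a b (max a.length b.length)) := by
  unfold find_broadcast_axes_py
  set n := max a.length b.length with hn
  have h1 : ((a.length : Int) - 1) = ((a.length : Int) - n + n - 1) := by omega
  have h2 : ((b.length : Int) - 1) = ((b.length : Int) - n + n - 1) := by omega
  rw [h1, h2, pvALoop_eq a b n rfl n (le_refl n) []]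
  simp

-- ===== VERDICT (by name: the statement is the Claim_ definition above) =====
theorem find_broadcast_axes_py_spec : Claim_equal_find_broadcast_axes_py := by
  intro a b _ _
  unfold Spec_find_broadcast_axes_py
  rw [pvA_eq, pvAlt_eq]
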